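-- pv_equiv track=rewrite | github.com/paiml/depyler | examples/hard_prac_fs_defrag.py | df_compact
-- ===== SOURCE A (Python) =====
-- def df_compact(disk: list[int], total: int) -> int:
--     """Compact disk: move all allocated blocks to front. Returns moves made."""
--     moves: int = 0
--     write_pos: int = 0
--     read_pos: int = 0
--     while read_pos < total:
--         b: int = disk[read_pos]
--         if b != 0:
--             if read_pos != write_pos:
--                 disk[write_pos] = b
--                 disk[read_pos] = 0
--                 moves = moves + 1
--             write_pos = write_pos + 1
--         read_pos = read_pos + 1
--     return moves
-- ===== SOURCE B (Python) =====
-- def df_compact(disk: list[int], total: int) -> int: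
--     """Compact disk: move all allocated blocks to front. Returns moves made."""
--     # pass 1: find the index of the first zero among disk[0:total] (-1 if none)
--     first_zero = -1
--     for i in range(total):
--         if disk[i] == 0 and first_zero < 0:
--             first_zero = i
--     # every non-zero block at or after the first zero ends up in a different slot
--     moves = 0
--     if first_zero >= 0:
--         for i in range(first_zero, total):
--             if disk[i] != 0:
--                 moves += 1
--     # pass 2: rewrite disk[0:total] compacted (same final state as the in-place sweep)
--     vals = [disk[i] for i in range(total) if disk[i] != 0]
--     for i in range(total):
--         disk[i] = vals[i] if i < len(vals) else 0
--     return moves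
-- ===== Notes on version B (the rewrite author's own statement) =====
-- stated objective: alternative
-- what changed: Replaces the in-place two-pointer sweep with a collect-then-rewrite decomposition: find the first zero index, count non-zero blocks at or after it (the move count), then rewrite the prefix compacted; no write pointer or per-step moves bookkeeping.
-- outside the precondition, e.g. on df_compact([1, 2], 3): A raises IndexError, B raises IndexError
import Mathlib
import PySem

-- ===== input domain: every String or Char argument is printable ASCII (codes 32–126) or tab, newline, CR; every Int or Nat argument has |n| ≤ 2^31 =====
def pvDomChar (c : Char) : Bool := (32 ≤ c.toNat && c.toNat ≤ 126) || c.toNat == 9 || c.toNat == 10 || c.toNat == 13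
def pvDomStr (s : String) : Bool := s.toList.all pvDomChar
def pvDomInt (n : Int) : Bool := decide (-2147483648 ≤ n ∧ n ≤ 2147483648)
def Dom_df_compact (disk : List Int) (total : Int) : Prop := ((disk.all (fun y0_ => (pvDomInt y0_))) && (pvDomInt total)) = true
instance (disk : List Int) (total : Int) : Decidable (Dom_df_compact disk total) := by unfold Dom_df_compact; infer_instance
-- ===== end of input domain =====

-- B replaces A's in-place two-pointer sweep by find-first-zero + count + rewrite; equal moves
-- are proved for the RETURN value (both programs also leave the list in the same final state,
-- but the mutation is not part of this claim).

-- ===== PORT A =====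
-- A's while loop; the Option threads the IndexError of disk[read_pos] (none = raise).
def dfLoopA (disk : List Int) (total moves write_pos read_pos : Int) : Option Int :=
  if _h : read_pos < total then
    match PySem.List.pyGet? disk read_pos with
    | none => none
    | some b =>
      if b ≠ 0 then
        if read_pos ≠ write_pos then
          dfLoopA ((disk.set write_pos.toNat b).set read_pos.toNat 0)
            total (moves + 1) (write_pos + 1) (read_pos + 1)
        else
          dfLoopA disk total moves (write_pos + 1) (read_pos + 1)
      else
        dfLoopA disk total moves write_pos (read_pos + 1)
  else
    some moves
termination_by (total - read_pos).toNat
decreasing_by all_goals omega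

-- Pre_ excludes the IndexError case, so .getD 0 is never the raising branch under the claim.
def df_compact (disk : List Int) (total : Int) : Int :=
  (dfLoopA disk total 0 0 0).getD 0

-- ===== PORT B =====
-- pass 1: first_zero accumulator over range(total)
def bFirstZero (disk : List Int) : List Int → Int → Option Int
  | [], fz => some fz
  | i :: rest, fz =>
    match PySem.List.pyGet? disk i with
    | none => none
    | some b => bFirstZero disk rest (if b = 0 ∧ fz < 0 then i else fz)

-- the counting loop: moves += 1 for each non-zero disk[i]
def bCount (disk : List Int) : List Int → Int → Option Int
  | [], m => some m
  | i :: rest, m =>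
    match PySem.List.pyGet? disk i with
    | none => none
    | some b => bCount disk rest (if b ≠ 0 then m + 1 else m)

-- pass-2 of Source B only mutates the list and does not affect the return value; it has no
-- counterpart in this return-value port.
def df_compact_alt (disk : List Int) (total : Int) : Int :=
  (match bFirstZero disk (PySem.List.pyRange 0 total 1) (-1) with
   | none => none
   | some first_zero =>
     if first_zero ≥ 0 then bCount disk (PySem.List.pyRange first_zero total 1) 0
     else some 0).getD 0

-- ===== PRECONDITION & SPEC =====
-- Pre_ excludes total > len(disk), on which A (and B) raise IndexError.
def Pre_df_compact (disk : List Int) (total : Int) : Prop := total ≤ (disk.length : Int)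
instance (disk : List Int) (total : Int) : Decidable (Pre_df_compact disk total) := by
  unfold Pre_df_compact; infer_instance
def pvWitness_df_compact : List Int × Int := ([1, 0, 2, 0, 3], 5)

def Spec_df_compact (disk : List Int) (total : Int) (out : Int) : Prop := out = df_compact_alt disk total
instance (disk : List Int) (total : Int) (out : Int) : Decidable (Spec_df_compact disk total out) := by unfold Spec_df_compact; infer_instance

-- ===== CLAIM (what is proved, stated in full; the proofs are below) =====
def Claim_equal_df_compact : Prop := ∀ (disk : List Int) (total : Int), Dom_df_compact disk total → Pre_df_compact disk total → Spec_df_compact disk total (df_compact disk total)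

-- ===== LEMMAS AND PROOFS =====

-- reference count: number of moves pending from position rp on, given whether a zero was seen
def cnt (d : List Int) (rp total : Int) (seen : Bool) : Int :=
  if _h : rp < total then
    if (PySem.List.pyGet? d rp).getD 0 ≠ 0 then
      (if seen then 1 else 0) + cnt d (rp + 1) total seen
    else
      cnt d (rp + 1) total true
  else 0
termination_by (total - rp).toNat
decreasing_by all_goals omega

theorem pyGet?_in_range (d : List Int) (i : Int) (h0 : 0 ≤ i) (h1 : i < (d.length : Int)) :
    PySem.List.pyGet? d i = some (d.getD i.toNat 0) := by
  rw [PySem.List.pyGet?_of_nonneg (xs := d) h0]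
  have : i.toNat < d.length := by omega
  simp [List.getElem?_eq_getElem this, List.getD_eq_getElem?_getD]

theorem pyGet?_set_gt (d : List Int) (j : Nat) (v : Int) (i : Int) (hij : (j : Int) < i) :
    PySem.List.pyGet? (d.set j v) i = PySem.List.pyGet? d i := by
  have h0 : 0 ≤ i := by omega
  rw [PySem.List.pyGet?_of_nonneg (xs := d.set j v) h0,
      PySem.List.pyGet?_of_nonneg (xs := d) h0,
      List.getElem?_set_ne (by omega)]

-- step equations (reduce the Option matches once the scrutinee is known)
theorem dfLoopA_step (d : List Int) (total moves write_pos read_pos b : Int)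
    (h : read_pos < total) (hget : PySem.List.pyGet? d read_pos = some b) :
    dfLoopA d total moves write_pos read_pos
      = if b ≠ 0 then
          if read_pos ≠ write_pos then
            dfLoopA ((d.set write_pos.toNat b).set read_pos.toNat 0)
              total (moves + 1) (write_pos + 1) (read_pos + 1)
          else dfLoopA d total moves (write_pos + 1) (read_pos + 1)
        else dfLoopA d total moves write_pos (read_pos + 1) := by
  rw [dfLoopA, dif_pos h, hget]

theorem dfLoopA_stop (d : List Int) (total moves write_pos read_pos : Int)
    (h : ¬ read_pos < total) : dfLoopA d total moves write_pos read_pos = some moves := by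
  rw [dfLoopA, dif_neg h]

theorem bFirstZero_cons (d : List Int) (i : Int) (rest : List Int) (fz b : Int)
    (hget : PySem.List.pyGet? d i = some b) :
    bFirstZero d (i :: rest) fz = bFirstZero d rest (if b = 0 ∧ fz < 0 then i else fz) := by
  rw [bFirstZero, hget]

theorem bCount_cons (d : List Int) (i : Int) (rest : List Int) (m b : Int)
    (hget : PySem.List.pyGet? d i = some b) :
    bCount d (i :: rest) m = bCount d rest (if b ≠ 0 then m + 1 else m) := by
  rw [bCount, hget]

theorem cnt_step (d : List Int) (rp total : Int) (seen : Bool) (b : Int)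
    (h : rp < total) (hget : PySem.List.pyGet? d rp = some b) :
    cnt d rp total seen
      = if b ≠ 0 then (if seen then 1 else 0) + cnt d (rp + 1) total seen
        else cnt d (rp + 1) total true := by
  rw [cnt, dif_pos h, hget]
  rfl

theorem cnt_stop (d : List Int) (rp total : Int) (seen : Bool) (h : ¬ rp < total) :
    cnt d rp total seen = 0 := by
  rw [cnt, dif_neg h]

theorem dfLoopA_eq_cnt (d d0 : List Int) (total moves write_pos read_pos : Int)
    (hw0 : 0 ≤ write_pos) (hwr : write_pos ≤ read_pos)
    (hlen : d.length = d0.length) (htot : total ≤ (d0.length : Int))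
    (hagree : ∀ i : Int, read_pos ≤ i → PySem.List.pyGet? d i = PySem.List.pyGet? d0 i) :
    dfLoopA d total moves write_pos read_pos
      = some (moves + cnt d0 read_pos total (decide (write_pos < read_pos))) := by
  by_cases h : read_pos < total
  · have hr0 : 0 ≤ read_pos := by omega
    have hget0 : PySem.List.pyGet? d0 read_pos = some (d0.getD read_pos.toNat 0) :=
      pyGet?_in_range d0 read_pos hr0 (by omega)
    have hget : PySem.List.pyGet? d read_pos = some (d0.getD read_pos.toNat 0) := by
      rw [hagree read_pos le_rfl]; exact hget0
    set b := d0.getD read_pos.toNat 0 with hb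
    rw [dfLoopA_step d total moves write_pos read_pos b h hget,
        cnt_step d0 read_pos total _ b h hget0]
    by_cases hbz : b ≠ 0
    · rw [if_pos hbz, if_pos hbz]
      by_cases hne : read_pos ≠ write_pos
      · have hlt : write_pos < read_pos := by omega
        rw [if_pos hne]
        have hagree' : ∀ i : Int, read_pos + 1 ≤ i →
            PySem.List.pyGet? ((d.set write_pos.toNat b).set read_pos.toNat 0) i
              = PySem.List.pyGet? d0 i := by
          intro i hi
          rw [pyGet?_set_gt _ read_pos.toNat 0 i (by omega),
              pyGet?_set_gt _ write_pos.toNat b i (by omega)]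
          exact hagree i (by omega)
        rw [dfLoopA_eq_cnt ((d.set write_pos.toNat b).set read_pos.toNat 0) d0 total
              (moves + 1) (write_pos + 1) (read_pos + 1) (by omega) (by omega)
              (by simp [hlen]) htot hagree']
        rw [decide_eq_true (show write_pos + 1 < read_pos + 1 by omega),
            decide_eq_true hlt]
        rw [show (if (true : Bool) = true then (1 : Int) else 0) = 1 from rfl]
        congr 1
        ring
      · rw [if_neg hne]
        rw [dfLoopA_eq_cnt d d0 total moves (write_pos + 1) (read_pos + 1) (by omega)
              (by omega) hlen htot (fun i hi => hagree i (by omega))]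
        rw [show decide (write_pos + 1 < read_pos + 1) = decide (write_pos < read_pos) by
              simp only [decide_eq_decide]; omega,
            decide_eq_false (show ¬ write_pos < read_pos by omega)]
        simp
    · rw [if_neg hbz, if_neg hbz]
      rw [dfLoopA_eq_cnt d d0 total moves write_pos (read_pos + 1) hw0 (by omega)
            hlen htot (fun i hi => hagree i (by omega))]
      rw [decide_eq_true (show write_pos < read_pos + 1 by omega)]
  · rw [dfLoopA_stop d total moves write_pos read_pos h, cnt_stop d0 read_pos total _ h]
    simp
termination_by (total - read_pos).toNat
decreasing_by all_goals omega

-- a non-negative accumulator is final: the first-zero scan never overwrites it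
theorem bFirstZero_fixed (d : List Int) (a b fz : Int) (hfz : 0 ≤ fz)
    (ha : 0 ≤ a) (hb : b ≤ (d.length : Int)) :
    bFirstZero d (PySem.List.pyRange a b 1) fz = some fz := by
  by_cases h : a < b
  · rw [PySem.List.pyRange_one_cons h,
        bFirstZero_cons d a _ fz _ (pyGet?_in_range d a ha (by omega)),
        if_neg (show ¬ (d.getD a.toNat 0 = 0 ∧ fz < 0) by omega)]
    exact bFirstZero_fixed d (a + 1) b fz hfz (by omega) hb
  · rw [PySem.List.pyRange_one_eq_nil (by omega), bFirstZero]
termination_by (b - a).toNat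
decreasing_by all_goals omega

-- the count loop counts every non-zero block: seen = true in cnt
theorem bCount_eq_cnt (d : List Int) (a b m : Int) (ha : 0 ≤ a) (hb : b ≤ (d.length : Int)) :
    bCount d (PySem.List.pyRange a b 1) m = some (m + cnt d a b true) := by
  by_cases h : a < b
  · have hget := pyGet?_in_range d a ha (by omega)
    rw [PySem.List.pyRange_one_cons h, bCount_cons d a _ m _ hget,
        cnt_step d a b true _ h hget]
    by_cases hz : d.getD a.toNat 0 ≠ 0
    · rw [if_pos hz, if_pos hz,
          show (if (true : Bool) = true then (1 : Int) else 0) = 1 from rfl,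
          bCount_eq_cnt d (a + 1) b (m + 1) (by omega) hb]
      congr 1
      ring
    · rw [if_neg hz, if_neg hz]
      exact bCount_eq_cnt d (a + 1) b m (by omega) hb
  · rw [PySem.List.pyRange_one_eq_nil (by omega), bCount, cnt_stop d a b true h]
    simp
termination_by (b - a).toNat
decreasing_by all_goals omega

-- B's whole pipeline computes cnt d rp b false
theorem alt_eq_cnt (d : List Int) (rp b : Int) (hrp : 0 ≤ rp) (hb : b ≤ (d.length : Int)) :
    (match bFirstZero d (PySem.List.pyRange rp b 1) (-1) with
     | none => none
     | some first_zero =>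
       if first_zero ≥ 0 then bCount d (PySem.List.pyRange first_zero b 1) 0
       else some 0) = some (cnt d rp b false) := by
  by_cases h : rp < b
  · have hget := pyGet?_in_range d rp hrp (by omega)
    rw [PySem.List.pyRange_one_cons h, bFirstZero_cons d rp _ (-1) _ hget,
        cnt_step d rp b false _ h hget]
    by_cases hz : d.getD rp.toNat 0 = 0
    · rw [if_pos (show d.getD rp.toNat 0 = 0 ∧ (-1 : Int) < 0 from ⟨hz, by omega⟩),
          bFirstZero_fixed d (rp + 1) b rp hrp (by omega) hb,
          if_neg (show ¬ d.getD rp.toNat 0 ≠ 0 by simpa using hz)]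
      simp only [if_pos (show rp ≥ 0 from hrp)]
      rw [bCount_eq_cnt d rp b 0 hrp hb, cnt_step d rp b true _ h hget,
          if_neg (show ¬ d.getD rp.toNat 0 ≠ 0 by simpa using hz)]
      congr 1
      ring
    · rw [if_neg (show ¬ (d.getD rp.toNat 0 = 0 ∧ (-1 : Int) < 0) from
            fun hcontra => hz hcontra.1),
          if_pos (show d.getD rp.toNat 0 ≠ 0 from hz),
          alt_eq_cnt d (rp + 1) b (by omega) hb]
      simp
  · rw [PySem.List.pyRange_one_eq_nil (by omega), bFirstZero]
    simp only [if_neg (show ¬ (-1 : Int) ≥ 0 by omega)]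
    rw [cnt_stop d rp b false h]
termination_by (b - rp).toNat
decreasing_by all_goals omega

-- ===== VERDICT (by name: the statement is the Claim_ definition above) =====
theorem df_compact_spec : Claim_equal_df_compact := by
  intro disk total _hdom hpre
  unfold Spec_df_compact df_compact df_compact_alt
  rw [dfLoopA_eq_cnt disk disk total 0 0 0 le_rfl le_rfl rfl hpre (fun _ _ => rfl)]
  rw [alt_eq_cnt disk 0 total (by omega) hpre]
  simp
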